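-- pv_equiv track=rewrite | github.com/queelius/mtk | src/mail_memex/search/engine.py | _tokenize_query
-- ===== SOURCE A (Python) =====
-- def _tokenize_query(query_str: str) -> list[str]:
--     """Tokenize query preserving quoted strings."""
--     tokens = []
--     current = ""
--     in_quotes = False
--
--     for char in query_str:
--         if char == '"':
--             in_quotes = not in_quotes
--         elif char == " " and not in_quotes:
--             if current:
--                 tokens.append(current)
--                 current = ""
--         else:
--             current += char
--
--     if current:
--         tokens.append(current)
--
--     return tokens
-- ===== SOURCE B (Python) =====
-- def _tokenize_query(query_str: str) -> list[str]:
--     """Tokenize query preserving quoted strings (split-on-quote decomposition)."""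
--     tokens = []
--     current = ""
--     for i, part in enumerate(query_str.split('"')):
--         if i % 2 == 1:
--             # inside quotes: keep verbatim, spaces included
--             current += part
--         else:
--             words = part.split(' ')
--             current += words[0]
--             for w in words[1:]:
--                 if current:
--                     tokens.append(current)
--                 current = w
--     if current:
--         tokens.append(current)
--     return tokens
-- ===== Notes on version B (the rewrite author's own statement) =====
-- stated objective: faster
-- what changed: Replaces A's character-by-character state machine (an in_quotes flag toggled per character, building tokens one char at a time) with a region decomposition: split the query at quote characters into alternating outside/inside regions, split only the outside regions at spaces, and flush a single running token between words.
import Mathlib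
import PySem

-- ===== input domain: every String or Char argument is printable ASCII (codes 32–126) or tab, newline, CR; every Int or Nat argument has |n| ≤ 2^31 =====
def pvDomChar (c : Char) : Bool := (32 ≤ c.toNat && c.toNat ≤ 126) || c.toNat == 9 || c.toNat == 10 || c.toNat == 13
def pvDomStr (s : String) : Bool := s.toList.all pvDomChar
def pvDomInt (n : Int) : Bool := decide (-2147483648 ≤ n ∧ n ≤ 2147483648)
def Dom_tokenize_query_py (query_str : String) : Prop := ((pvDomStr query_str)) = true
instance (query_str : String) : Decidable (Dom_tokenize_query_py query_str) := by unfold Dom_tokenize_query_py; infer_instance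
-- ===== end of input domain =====

-- B replaces A's char-by-char quote/space state machine with a split-on-quote decomposition
-- (alternating outside/inside regions; outside regions split on spaces); measured constant-factor faster in Python.

-- ===== PORT A =====
-- one character of A's loop: state = (tokens, current, in_quotes)
def tqStepA (st : List (List Char) × List Char × Bool) (c : Char) :
    List (List Char) × List Char × Bool :=
  if c = '"' then (st.1, st.2.1, !st.2.2)
  else if c = ' ' && !st.2.2 then
    (if st.2.1 = [] then st else (st.1 ++ [st.2.1], [], st.2.2))
  else (st.1, st.2.1 ++ [c], st.2.2)

def tokenize_query_py (query_str : String) : List String :=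
  let st := query_str.toList.foldl tqStepA ([], [], false)
  (if st.2.1 = [] then st.1 else st.1 ++ [st.2.1]).map String.mk

-- ===== PORT B =====
-- flush `current` (if non-empty) into tokens and start a new word
def tqFlush (st : List (List Char) × List Char) (w : List Char) :
    List (List Char) × List Char :=
  ((if st.2 = [] then st.1 else st.1 ++ [st.2]), w)

-- an even (outside-quote) part: split on ' ', merge first word into current, flush the rest
def tqEven (st : List (List Char) × List Char) (part : List Char) :
    List (List Char) × List Char :=
  let words := part.splitOn ' '
  words.tail.foldl tqFlush (st.1, st.2 ++ words.headI)

def tqStepB (st : List (List Char) × List Char) (ip : Int × List Char) :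
    List (List Char) × List Char :=
  if ip.1 % 2 = 1 then (st.1, st.2 ++ ip.2) else tqEven st ip.2

def tokenize_query_py_alt (query_str : String) : List String :=
  let parts := query_str.toList.splitOn '"'
  let st := (PySem.List.enumerate parts 0).foldl tqStepB ([], [])
  (if st.2 = [] then st.1 else st.1 ++ [st.2]).map String.mk

-- ===== PRECONDITION & SPEC =====
def Spec_tokenize_query_py (query_str : String) (out : List String) : Prop := out = tokenize_query_py_alt query_str
instance (query_str : String) (out : List String) : Decidable (Spec_tokenize_query_py query_str out) := by unfold Spec_tokenize_query_py; infer_instance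

-- ===== CLAIM (what is proved, stated in full; the proofs are below) =====
def Claim_equal_tokenize_query_py : Prop := ∀ (query_str : String), Dom_tokenize_query_py query_str → Spec_tokenize_query_py query_str (tokenize_query_py query_str)

-- ===== LEMMAS AND PROOFS =====

-- parity-recursive reformulation of B's enumerated fold (proof helper only)
def tqProcB : List (List Char) → Bool → (List (List Char) × List Char) →
    (List (List Char) × List Char)
  | [], _, st => st
  | p :: ps, b, st => tqProcB ps (!b) (if b then (st.1, st.2 ++ p) else tqEven st p)

theorem tq_enum_fold (parts : List (List Char)) : ∀ (n : Int), 0 ≤ n →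
    ∀ st, (PySem.List.enumerate parts n).foldl tqStepB st
      = tqProcB parts (decide (n % 2 = 1)) st := by
  induction parts with
  | nil => intro n _ st; simp [PySem.List.enumerate_nil, tqProcB]
  | cons p ps ih =>
    intro n hn st
    rw [PySem.List.enumerate_cons]
    simp only [List.foldl_cons, tqStepB, tqProcB]
    rw [ih (n + 1) (by omega)]
    have hpar : decide ((n + 1) % 2 = 1) = !decide (n % 2 = 1) := by
      rcases Int.emod_two_eq_zero_or_one n with h | h <;> simp [h] <;> omega
    rw [hpar]
    by_cases h : n % 2 = 1 <;> simp [h]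

theorem tq_splitOnP_no_sep {α : Type} (q : α → Bool) :
    ∀ (xs : List α) (p : List α), p ∈ List.splitOnP q xs → ∀ a ∈ p, q a = false := by
  intro xs
  induction xs with
  | nil => intro p hp a ha; simp [List.splitOnP_nil] at hp; subst hp; simp at ha
  | cons x xs ih =>
    intro p hp a ha
    rw [List.splitOnP_cons] at hp
    by_cases hx : q x = true
    · simp [hx] at hp
      rcases hp with h | h
      · subst h; simp at ha
      · exact ih p h a ha
    · rw [if_neg hx] at hp
      obtain ⟨h, t, hst⟩ := List.exists_cons_of_ne_nil (List.splitOnP_ne_nil q xs)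
      rw [hst, List.modifyHead] at hp
      rcases List.mem_cons.mp hp with h1 | h1
      · subst h1
        rcases List.mem_cons.mp ha with ha2 | ha2
        · subst ha2; simpa using hx
        · exact ih h (by rw [hst]; exact List.mem_cons_self) a ha2
      · exact ih p (by rw [hst]; exact List.mem_cons_of_mem _ h1) a ha

-- inside quotes, A just accumulates characters
theorem tq_inside (p : List Char) : ∀ t cur, '"' ∉ p →
    p.foldl tqStepA (t, cur, true) = (t, cur ++ p, true) := by
  induction p with
  | nil => intro t cur _; simp
  | cons c p ih =>
    intro t cur hq
    have hc : c ≠ '"' := fun h => hq (h ▸ List.mem_cons_self)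
    simp only [List.foldl_cons, tqStepA, if_neg hc]
    simp only [Bool.not_true, Bool.and_false, Bool.false_eq_true, if_false]
    rw [ih _ _ (fun h => hq (List.mem_cons_of_mem _ h))]
    simp

-- outside quotes, A's char loop computes exactly B's even-part step
theorem tq_outside (p : List Char) : ∀ t cur, '"' ∉ p →
    p.foldl tqStepA (t, cur, false)
      = ((tqEven (t, cur) p).1, (tqEven (t, cur) p).2, false) := by
  induction p with
  | nil => intro t cur _; simp [tqEven, List.splitOn, List.splitOnP_nil]
  | cons c p ih =>
    intro t cur hq
    have hc : c ≠ '"' := fun h => hq (h ▸ List.mem_cons_self)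
    have hp : '"' ∉ p := fun h => hq (List.mem_cons_of_mem _ h)
    obtain ⟨w0, rest, hw⟩ := List.exists_cons_of_ne_nil
      (List.splitOnP_ne_nil (fun a => a == ' ') p)
    have hw' : p.splitOn ' ' = w0 :: rest := hw
    by_cases hsp : c = ' '
    ·  subst hsp
       have hsplit : (' ' :: p).splitOn ' ' = [] :: p.splitOn ' ' := by
         simp [List.splitOn, List.splitOnP_cons]
       have hstep : tqStepA (t, cur, false) ' '
           = ((if cur = [] then t else t ++ [cur]), [], false) := by
         by_cases hcur : cur = [] <;> simp [tqStepA, hcur]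
       rw [List.foldl_cons, hstep, ih _ [] hp]
       simp only [tqEven, hsplit, hw', List.tail_cons, List.headI,
         List.foldl_cons, tqFlush, List.nil_append, List.append_nil]
    ·  have hstep : tqStepA (t, cur, false) c = (t, cur ++ [c], false) := by
         simp [tqStepA, hc, hsp]
       rw [List.foldl_cons, hstep, ih t (cur ++ [c]) hp]
       have hsplit : (c :: p).splitOn ' ' = (c :: w0) :: rest := by
         simp only [List.splitOn, List.splitOnP_cons]
         rw [if_neg (by simpa using hsp)]
         rw [show List.splitOnP (fun a => a == ' ') p = w0 :: rest from hw]
         rfl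
       simp only [tqEven, hsplit, List.tail_cons, List.headI, hw']
       simp

-- the main correspondence: A's fold over the interleaving equals tqProcB
theorem tq_main : ∀ (parts : List (List Char)), (∀ p ∈ parts, '"' ∉ p) →
    ∀ (b : Bool) t cur, ∃ b',
      (['"'].intercalate parts).foldl tqStepA (t, cur, b)
        = ((tqProcB parts b (t, cur)).1, (tqProcB parts b (t, cur)).2, b') := by
  intro parts
  induction parts with
  | nil => intro _ b t cur; exact ⟨b, by simp [List.intercalate, tqProcB]⟩
  | cons p ps ih =>
    intro hfree b t cur
    have hpfree : '"' ∉ p := hfree p List.mem_cons_self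
    have hpsfree : ∀ q ∈ ps, '"' ∉ q := fun q hq => hfree q (List.mem_cons_of_mem _ hq)
    cases ps with
    | nil =>
      cases b with
      | false =>
        refine ⟨false, ?_⟩
        simp only [List.intercalate, List.intersperse_single, List.flatten, tqProcB]
        simpa using tq_outside p t cur hpfree
      | true =>
        refine ⟨true, ?_⟩
        simp only [List.intercalate, List.intersperse_single, List.flatten, tqProcB]
        simpa [tqProcB] using tq_inside p t cur hpfree
    | cons q qs =>
      have hsplit : ['"'].intercalate (p :: q :: qs)
          = p ++ '"' :: ['"'].intercalate (q :: qs) := by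
        simp [List.intercalate, List.intersperse]
      rw [hsplit, List.foldl_append]
      cases b with
      | false =>
        rw [tq_outside p t cur hpfree]
        rw [List.foldl_cons]
        have hq : tqStepA ((tqEven (t, cur) p).1, (tqEven (t, cur) p).2, false) '"'
            = ((tqEven (t, cur) p).1, (tqEven (t, cur) p).2, true) := by
          simp [tqStepA]
        rw [hq]
        obtain ⟨b', hb'⟩ := ih hpsfree true (tqEven (t, cur) p).1 (tqEven (t, cur) p).2
        exact ⟨b', by rw [hb']; simp [tqProcB]⟩
      | true =>
        rw [tq_inside p t cur hpfree]
        rw [List.foldl_cons]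
        have hq : tqStepA (t, cur ++ p, true) '"' = (t, cur ++ p, false) := by
          simp [tqStepA]
        rw [hq]
        obtain ⟨b', hb'⟩ := ih hpsfree false t (cur ++ p)
        exact ⟨b', by rw [hb']; simp [tqProcB]⟩

-- ===== VERDICT (by name: the statement is the Claim_ definition above) =====
theorem tokenize_query_py_spec : Claim_equal_tokenize_query_py := by
  intro query_str _
  unfold Spec_tokenize_query_py
  have hfree : ∀ p ∈ query_str.toList.splitOn '"', '"' ∉ p := by
    intro p hp hmem
    have := tq_splitOnP_no_sep (fun a => a == '"') query_str.toList p hp '"' hmem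
    simp at this
  have hchars : query_str.toList = ['"'].intercalate (query_str.toList.splitOn '"') :=
    (List.intercalate_splitOn query_str.toList '"').symm
  obtain ⟨b', hb'⟩ := tq_main (query_str.toList.splitOn '"') hfree false [] []
  have hA : query_str.toList.foldl tqStepA ([], [], false)
      = ((tqProcB (query_str.toList.splitOn '"') false ([], [])).1,
         (tqProcB (query_str.toList.splitOn '"') false ([], [])).2, b') := by
    conv_lhs => rw [hchars]
    exact hb'
  unfold tokenize_query_py tokenize_query_py_alt
  simp only [hA, tq_enum_fold _ 0 (by norm_num),
    show decide ((0 : Int) % 2 = 1) = false from rfl]
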